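-- pv_equiv track=rewrite | github.com/tdavislab/GWMT | Tracking-graph-visual-demo/dataProcessor/processor.py | get_closest_id
-- ===== SOURCE A (Python) =====
-- def get_closest_id(ideal_y_id, y_index_lst):
--     shift = 1
--     while True:
--         res = []
--         top = ideal_y_id-shift
--         btm = ideal_y_id+shift
--         if top >= 0 and top not in y_index_lst:
--             res.append(top)
--         if btm not in y_index_lst:
--             res.append(btm)
--         shift += 1
--         if len(res) != 0:
--             return res
-- ===== SOURCE B (Python) =====
-- def get_closest_id(ideal_y_id, y_index_lst):
--     occupied = set(y_index_lst)
--     # upward scan: smallest distance da with ideal_y_id + da free (always exists)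
--     da = 1
--     while ideal_y_id + da in occupied:
--         da += 1
--     # downward scan: smallest distance db <= da with ideal_y_id - db >= 0 and free
--     db = None
--     for s in range(1, da + 1):
--         if ideal_y_id - s >= 0 and ideal_y_id - s not in occupied:
--             db = s
--             break
--     if db is not None and db < da:
--         return [ideal_y_id - db]
--     res = []
--     if db == da:
--         res.append(ideal_y_id - db)
--     res.append(ideal_y_id + da)
--     return res
-- ===== Notes on version B (the rewrite author's own statement) =====
-- stated objective: alternative
-- what changed: Replaces A's single expanding bidirectional while-loop (both directions probed at each shift) by two separate directional scans over a precomputed set: an upward scan finds the nearest free slot above, then a bounded downward for-loop finds the nearest free slot at most that far below, and the result is assembled from the two distances.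
import Mathlib
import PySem

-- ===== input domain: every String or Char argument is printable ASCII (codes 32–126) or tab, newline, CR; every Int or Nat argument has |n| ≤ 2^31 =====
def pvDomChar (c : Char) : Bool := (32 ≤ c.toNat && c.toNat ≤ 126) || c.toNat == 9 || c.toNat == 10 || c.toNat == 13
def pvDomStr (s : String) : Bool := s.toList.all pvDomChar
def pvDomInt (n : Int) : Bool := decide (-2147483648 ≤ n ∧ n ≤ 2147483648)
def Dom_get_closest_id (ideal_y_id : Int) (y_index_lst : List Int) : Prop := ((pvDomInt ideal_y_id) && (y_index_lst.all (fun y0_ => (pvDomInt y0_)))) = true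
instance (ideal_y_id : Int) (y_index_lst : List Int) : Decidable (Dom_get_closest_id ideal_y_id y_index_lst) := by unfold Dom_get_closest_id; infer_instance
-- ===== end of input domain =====

-- B replaces A's single expanding bidirectional while-loop by two separate directional scans
-- (upward first, then a downward scan bounded by the upward distance); objective: alternative decomposition.

-- ===== PORT A =====
-- A's 'while True' loop; the Nat fuel (length+1) only makes it total: the loop provably
-- returns within that many iterations on every input, so the fuel-0 branch is never reached.
def pvALoop (ideal_y_id : Int) (y_index_lst : List Int) : Int → Nat → List Int
  | _, 0 => []
  | shift, fuel+1 =>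
    let top := ideal_y_id - shift
    let btm := ideal_y_id + shift
    let res : List Int :=
      (if top ≥ 0 ∧ top ∉ y_index_lst then [top] else []) ++
      (if btm ∉ y_index_lst then [btm] else [])
    if res ≠ [] then res else pvALoop ideal_y_id y_index_lst (shift + 1) fuel

def get_closest_id (ideal_y_id : Int) (y_index_lst : List Int) : List Int :=
  pvALoop ideal_y_id y_index_lst 1 (y_index_lst.length + 1)

-- ===== PORT B =====
-- B's upward 'while' scan; again the fuel (length+1) only makes it total (some slot among
-- the first length+1 upward candidates is necessarily free).
def pvUpScan (ideal_y_id : Int) (occupied : List Int) : Int → Nat → Int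
  | d, 0 => d
  | d, fuel+1 => if (ideal_y_id + d) ∈ occupied then pvUpScan ideal_y_id occupied (d + 1) fuel else d

-- B's downward 'for s in range(1, da+1): … break' scan (first match or None).
def pvDownScan (ideal_y_id : Int) (occupied : List Int) : List Int → Option Int
  | [] => none
  | s :: rest =>
    if ideal_y_id - s ≥ 0 ∧ (ideal_y_id - s) ∉ occupied then some s
    else pvDownScan ideal_y_id occupied rest

def get_closest_id_alt (ideal_y_id : Int) (y_index_lst : List Int) : List Int :=
  let occupied := PySem.Set.ofList y_index_lst
  let da := pvUpScan ideal_y_id occupied 1 (y_index_lst.length + 1)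
  let db := pvDownScan ideal_y_id occupied (PySem.List.pyRange 1 (da + 1) 1)
  match db with
  | some s => if s < da then [ideal_y_id - s] else [ideal_y_id - s, ideal_y_id + da]
  | none => [ideal_y_id + da]

-- ===== PRECONDITION & SPEC =====
def Spec_get_closest_id (ideal_y_id : Int) (y_index_lst : List Int) (out : List Int) : Prop := out = get_closest_id_alt ideal_y_id y_index_lst
instance (ideal_y_id : Int) (y_index_lst : List Int) (out : List Int) : Decidable (Spec_get_closest_id ideal_y_id y_index_lst out) := by unfold Spec_get_closest_id; infer_instance

-- ===== CLAIM (what is proved, stated in full; the proofs are below) =====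
def Claim_equal_get_closest_id : Prop := ∀ (ideal_y_id : Int) (y_index_lst : List Int), Dom_get_closest_id ideal_y_id y_index_lst → Spec_get_closest_id ideal_y_id y_index_lst (get_closest_id ideal_y_id y_index_lst)

-- ===== LEMMAS AND PROOFS =====

-- the result A's loop body builds at shift s
def pvMkRes (id : Int) (lst : List Int) (s : Int) : List Int :=
  (if id - s ≥ 0 ∧ (id - s) ∉ lst then [id - s] else []) ++
  (if (id + s) ∉ lst then [id + s] else [])

lemma pvALoop_eq (id : Int) (lst : List Int) :
    ∀ (m fuel : Nat) (s : Int), m < fuel →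
      (∀ k : Nat, k < m →
        ¬ ((id - (s + k) ≥ 0 ∧ (id - (s + k)) ∉ lst) ∨ (id + (s + k)) ∉ lst)) →
      ((id - (s + m) ≥ 0 ∧ (id - (s + m)) ∉ lst) ∨ (id + (s + m)) ∉ lst) →
      pvALoop id lst s fuel = pvMkRes id lst (s + m) := by
  intro m
  induction m with
  | zero =>
    intro fuel s hf _ hC
    match fuel, hf with
    | fuel+1, _ =>
      simp only [Int.natCast_zero, add_zero] at hC
      have hne : pvMkRes id lst s ≠ [] := by
        unfold pvMkRes
        rcases hC with h | h
        · rw [if_pos h]; simp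
        · rw [if_pos h]; simp
      simp only [Int.natCast_zero, add_zero]
      show (if pvMkRes id lst s ≠ [] then pvMkRes id lst s else pvALoop id lst (s+1) fuel)
            = pvMkRes id lst s
      rw [if_pos hne]
  | succ m ih =>
    intro fuel s hf hmin hC
    match fuel, hf with
    | fuel+1, hf =>
      have h0 : ¬ ((id - s ≥ 0 ∧ (id - s) ∉ lst) ∨ (id + s) ∉ lst) := by
        have := hmin 0 (Nat.succ_pos m); simpa using this
      have hres : pvMkRes id lst s = [] := by
        unfold pvMkRes
        rw [if_neg (fun h => h0 (Or.inl h)), if_neg (fun h => h0 (Or.inr h))]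
        rfl
      have step : pvALoop id lst s (fuel+1) = pvALoop id lst (s+1) fuel := by
        show (if pvMkRes id lst s ≠ [] then pvMkRes id lst s else pvALoop id lst (s+1) fuel)
              = pvALoop id lst (s+1) fuel
        rw [if_neg (by simp [hres])]
      rw [step]
      have := ih fuel (s+1) (Nat.lt_of_succ_lt_succ hf)
        (fun k hk => by
          have h := hmin (k+1) (Nat.succ_lt_succ hk)
          have e : s + ((k : Int) + 1) = s + 1 + (k : Int) := by ring
          push_cast at h
          rw [e] at h
          exact h)
        (by
          push_cast at hC
          have e : s + ((m : Int) + 1) = s + 1 + (m : Int) := by ring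
          rw [e] at hC
          exact hC)
      rw [this]
      congr 1
      push_cast; ring

lemma pvUpScan_eq (id : Int) (occ : List Int) :
    ∀ (m fuel : Nat) (d : Int), m < fuel →
      (∀ k : Nat, k < m → (id + (d + k)) ∈ occ) → (id + (d + m)) ∉ occ →
      pvUpScan id occ d fuel = d + m := by
  intro m
  induction m with
  | zero =>
    intro fuel d hf _ hfree
    match fuel, hf with
    | fuel+1, _ =>
      simp only [Int.natCast_zero, add_zero] at hfree ⊢
      show (if (id + d) ∈ occ then pvUpScan id occ (d+1) fuel else d) = d
      rw [if_neg hfree]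
  | succ m ih =>
    intro fuel d hf hocc hfree
    match fuel, hf with
    | fuel+1, hf =>
      have h0 : (id + d) ∈ occ := by have := hocc 0 (Nat.succ_pos m); simpa using this
      show (if (id + d) ∈ occ then pvUpScan id occ (d+1) fuel else d) = d + (m+1 : Nat)
      rw [if_pos h0]
      have := ih fuel (d+1) (Nat.lt_of_succ_lt_succ hf)
        (fun k hk => by
          have h := hocc (k+1) (Nat.succ_lt_succ hk)
          have e : d + ((k : Int) + 1) = d + 1 + (k : Int) := by ring
          push_cast at h; rw [e] at h; exact h)
        (by
          intro h; apply hfree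
          have e : d + ((m : Int) + 1) = d + 1 + (m : Int) := by ring
          push_cast; rw [e]; exact h)
      rw [this]; push_cast; ring

lemma pvDownScan_none_iff (id : Int) (occ : List Int) (l : List Int) :
    pvDownScan id occ l = none ↔ ∀ s ∈ l, ¬ (id - s ≥ 0 ∧ (id - s) ∉ occ) := by
  induction l with
  | nil => simp [pvDownScan]
  | cons x xs ih =>
    show (if id - x ≥ 0 ∧ (id - x) ∉ occ then some x else pvDownScan id occ xs) = none ↔ _
    by_cases h : id - x ≥ 0 ∧ (id - x) ∉ occ
    · rw [if_pos h]
      constructor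
      · intro hc; cases hc
      · intro hall; exact absurd h (hall x List.mem_cons_self)
    · rw [if_neg h]
      constructor
      · intro hc s hs
        rcases List.mem_cons.mp hs with rfl | hsl
        · exact h
        · exact (ih.mp hc) s hsl
      · intro hall
        exact ih.mpr (fun s hs => hall s (List.mem_cons_of_mem _ hs))

lemma pvDownScan_some_spec (id : Int) (occ : List Int) (s : Int) :
    ∀ (l : List Int), l.Pairwise (· < ·) → pvDownScan id occ l = some s →
      s ∈ l ∧ (id - s ≥ 0 ∧ (id - s) ∉ occ) ∧
        ∀ t ∈ l, t < s → ¬ (id - t ≥ 0 ∧ (id - t) ∉ occ) := by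
  intro l
  induction l with
  | nil => intro _ h; simp [pvDownScan] at h
  | cons x xs ih =>
    intro hpw hsc
    rw [show pvDownScan id occ (x :: xs)
          = (if id - x ≥ 0 ∧ (id - x) ∉ occ then some x else pvDownScan id occ xs) from rfl] at hsc
    by_cases h : id - x ≥ 0 ∧ (id - x) ∉ occ
    · rw [if_pos h] at hsc
      injection hsc with hx; subst hx
      refine ⟨List.mem_cons_self, h, ?_⟩
      intro t ht hts
      rcases List.mem_cons.mp ht with rfl | htl
      · omega
      · exact absurd hts (not_lt.mpr (le_of_lt ((List.pairwise_cons.mp hpw).1 t htl)))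
    · rw [if_neg h] at hsc
      obtain ⟨hmem, hfree, hmin⟩ := ih (List.pairwise_cons.mp hpw).2 hsc
      refine ⟨List.mem_cons_of_mem _ hmem, hfree, ?_⟩
      intro t ht hts
      rcases List.mem_cons.mp ht with rfl | htl
      · exact h
      · exact hmin t htl hts

-- pigeonhole: among a, a+1, …, a+len some value is not in the list
lemma pvPigeonhole (lst : List Int) (a : Int) :
    ∃ k : Nat, k ≤ lst.length ∧ (a + k) ∉ lst := by
  by_contra h
  push Not at h
  have hsub : ((List.range (lst.length + 1)).map (fun k : Nat => a + (k : Int))) ⊆ lst := by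
    intro x hx
    rw [List.mem_map] at hx
    obtain ⟨k, hk, rfl⟩ := hx
    rw [List.mem_range] at hk
    exact h k (Nat.lt_succ_iff.mp hk)
  have hnd : ((List.range (lst.length + 1)).map (fun k : Nat => a + (k : Int))).Nodup := by
    refine List.Nodup.map ?_ List.nodup_range
    intro i j hij
    simp only at hij
    omega
  have := (hnd.subperm hsub).length_le
  simp at this

-- the main equivalence
lemma pvMain (id : Int) (lst : List Int) :
    get_closest_id id lst = get_closest_id_alt id lst := by
  classical
  set n := lst.length with hn
  obtain ⟨k0, hk0n, hk0free⟩ := pvPigeonhole lst (id + 1)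
  have hk0free' : (id + (1 + (k0 : Int))) ∉ lst := by
    intro h; apply hk0free; convert h using 1; ring
  have hex : ∃ k : Nat, (id + (1 + (k : Int))) ∉ lst := ⟨k0, hk0free'⟩
  set nd := Nat.find hex with hnd
  have hndfree : (id + (1 + (nd : Int))) ∉ lst := Nat.find_spec hex
  have hndmin : ∀ k : Nat, k < nd → (id + (1 + (k : Int))) ∈ lst := fun k hk => by
    have := Nat.find_min hex hk; simpa using this
  have hndle : nd ≤ n := by
    by_contra hlt
    exact hk0free' (hndmin k0 (by omega))
  set da : Int := 1 + (nd : Int) with hda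
  have hda1 : 1 ≤ da := by omega
  have hup : pvUpScan id (PySem.Set.ofList lst) 1 (n + 1) = da := by
    rw [hda]
    apply pvUpScan_eq id _ nd (n+1) 1 (by omega)
    · intro k hk; rw [PySem.Set.mem_ofList]; exact hndmin k hk
    · rw [PySem.Set.mem_ofList]; exact hndfree
  have hUda : (id + da) ∉ lst := hndfree
  have hUmin : ∀ s : Int, 1 ≤ s → s < da → (id + s) ∈ lst := by
    intro s h1 h2
    obtain ⟨k, rfl, hk2⟩ : ∃ k : Nat, s = 1 + (k : Int) ∧ k < nd :=
      ⟨(s - 1).toNat, by omega, by omega⟩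
    exact hndmin k hk2
  have hrange : ∀ s : Int, s ∈ PySem.List.pyRange 1 (da + 1) 1 ↔ 1 ≤ s ∧ s ≤ da := by
    intro s; rw [PySem.List.mem_pyRange_one]; omega
  have hpw : (PySem.List.pyRange 1 (da + 1) 1).Pairwise (· < ·) :=
    PySem.List.pairwise_lt_pyRange_one 1 (da + 1)
  have hBdef : get_closest_id_alt id lst =
      match pvDownScan id (PySem.Set.ofList lst) (PySem.List.pyRange 1 (da + 1) 1) with
      | some s => if s < da then [id - s] else [id - s, id + da]
      | none => [id + da] := by
    show (match pvDownScan id (PySem.Set.ofList lst)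
            (PySem.List.pyRange 1 (pvUpScan id (PySem.Set.ofList lst) 1 (lst.length + 1) + 1) 1) with
          | some s => if s < pvUpScan id (PySem.Set.ofList lst) 1 (lst.length + 1)
              then [id - s]
              else [id - s, id + pvUpScan id (PySem.Set.ofList lst) 1 (lst.length + 1)]
          | none => [id + pvUpScan id (PySem.Set.ofList lst) 1 (lst.length + 1)]) = _
    rw [← hn, hup]
  rcases hDS : pvDownScan id (PySem.Set.ofList lst) (PySem.List.pyRange 1 (da + 1) 1) with _ | s
  · -- no downward slot within distance da: A first fires at shift da, btm only
    have hnoT : ∀ s : Int, 1 ≤ s → s ≤ da → ¬ (id - s ≥ 0 ∧ (id - s) ∉ lst) := by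
      intro s h1 h2 ht
      have := (pvDownScan_none_iff id _ _).mp hDS s ((hrange s).mpr ⟨h1, h2⟩)
      exact this ⟨ht.1, by rw [PySem.Set.mem_ofList]; exact ht.2⟩
    have hA : get_closest_id id lst = pvMkRes id lst (1 + (nd : Int)) := by
      unfold get_closest_id
      rw [← hn]
      exact pvALoop_eq id lst nd (n+1) 1 (by omega)
        (fun k hk => by
          rintro (ht | hu)
          · exact hnoT (1 + k) (by omega) (by omega) ht
          · exact hu (hUmin (1 + k) (by omega) (by omega)))
        (Or.inr (by rw [← hda]; exact hUda))
    rw [hA, hBdef, hDS, ← hda]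
    unfold pvMkRes
    rw [if_neg (hnoT da (by omega) le_rfl), if_pos hUda]
    simp
  · -- downward slot found at distance s ≤ da
    obtain ⟨hmem, hfree, hmin⟩ := pvDownScan_some_spec id _ s _ hpw hDS
    have hs1 : 1 ≤ s ∧ s ≤ da := (hrange s).mp hmem
    have hTs : id - s ≥ 0 ∧ (id - s) ∉ lst :=
      ⟨hfree.1, by rw [← PySem.Set.mem_ofList]; exact hfree.2⟩
    have hnoT : ∀ t : Int, 1 ≤ t → t < s → ¬ (id - t ≥ 0 ∧ (id - t) ∉ lst) := by
      intro t h1 h2 ht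
      exact hmin t ((hrange t).mpr ⟨h1, by omega⟩) h2
        ⟨ht.1, by rw [PySem.Set.mem_ofList]; exact ht.2⟩
    obtain ⟨m, rfl⟩ : ∃ m : Nat, s = 1 + (m : Int) := ⟨(s - 1).toNat, by omega⟩
    have hA : get_closest_id id lst = pvMkRes id lst (1 + (m : Int)) := by
      unfold get_closest_id
      rw [← hn]
      exact pvALoop_eq id lst m (n+1) 1 (by omega)
        (fun k hk => by
          rintro (ht | hu)
          · exact hnoT (1 + k) (by omega) (by omega) ht
          · exact hu (hUmin (1 + k) (by omega) (by omega)))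
        (Or.inl hTs)
    rw [hA, hBdef, hDS]
    unfold pvMkRes
    rw [if_pos hTs]
    by_cases hsda : (1 + (m : Int)) < da
    · rw [if_neg (by simpa using hUmin _ hs1.1 hsda)]
      simp [hsda]
    · have hseq : (1 + (m : Int)) = da := by omega
      rw [if_pos (by rw [hseq]; exact hUda), hseq]
      simp

-- ===== VERDICT (by name: the statement is the Claim_ definition above) =====
theorem get_closest_id_spec : Claim_equal_get_closest_id := by
  intro id lst _
  unfold Spec_get_closest_id
  exact pvMain id lst
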